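-- pv_equiv track=rewrite | github.com/369harshit/step4-BinarySearch | Find out how many times the array has been rotated.py | findRotationCount
-- ===== SOURCE A (Python) =====
-- def findRotationCount(nums):
--     left, right = 0, len(nums) - 1
--
--     while left < right:
--         mid = (left + right) // 2
--
--         if nums[mid] > nums[right]:
--             left = mid + 1
--         else:
--             right = mid
--
--     return left
-- ===== SOURCE B (Python) =====
-- def findRotationCount(nums):
--     def go(sub, offset):
--         if len(sub) <= 1:
--             return offset
--         mid = (len(sub) - 1) // 2
--         if sub[mid] > sub[-1]:
--             return go(sub[mid + 1:], offset + mid + 1)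
--         return go(sub[:mid + 1], offset)
--     return go(nums, 0)
-- ===== Notes on version B (the rewrite author's own statement) =====
-- stated objective: alternative
-- what changed: Replaced the iterative two-pointer binary search with a recursive divide-and-conquer that carries the current list slice plus an offset, recursing on the physical sublist instead of moving index bounds.
import Mathlib
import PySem

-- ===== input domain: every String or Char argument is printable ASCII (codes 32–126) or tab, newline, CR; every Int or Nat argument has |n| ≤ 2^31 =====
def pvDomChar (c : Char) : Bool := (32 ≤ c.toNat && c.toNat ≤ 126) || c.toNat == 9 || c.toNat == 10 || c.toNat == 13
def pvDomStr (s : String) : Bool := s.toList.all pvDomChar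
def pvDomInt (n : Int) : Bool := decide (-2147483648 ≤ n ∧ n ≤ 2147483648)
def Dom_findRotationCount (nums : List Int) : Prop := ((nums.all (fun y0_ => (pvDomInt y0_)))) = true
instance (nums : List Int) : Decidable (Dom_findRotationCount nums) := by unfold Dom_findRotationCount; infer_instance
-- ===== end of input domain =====

-- B recasts A's iterative two-pointer binary search as recursion on the current list slice with an offset; same comparisons, same result.

-- ===== PORT A =====
-- while left < right: mid = (left+right)//2; if nums[mid] > nums[right]: left = mid+1 else right = mid
def findRotationCountLoop (nums : List Int) (left right : Int) : Int :=
  if h : left < right then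
    let mid := PySem.Int.floordiv (left + right) 2
    if PySem.List.pyGetD nums mid 0 > PySem.List.pyGetD nums right 0 then
      findRotationCountLoop nums (mid + 1) right
    else
      findRotationCountLoop nums left mid
  else left
termination_by (right - left).toNat
decreasing_by
  · have := PySem.Int.floordiv_two_mid_bounds (le_of_lt h)
    omega
  · have := PySem.Int.floordiv_two_mid_bounds (le_of_lt h)
    have h2 : PySem.Int.floordiv (left + right) 2 < right := by
      rw [PySem.Int.floordiv_eq_ediv_of_pos (by omega)]; omega
    omega

def findRotationCount (nums : List Int) : Int :=
  findRotationCountLoop nums 0 ((nums.length : Int) - 1)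

-- ===== PORT B =====
-- def go(sub, offset): base on len(sub) <= 1; recurse on sub[mid+1:] or sub[:mid+1]
def findRotationCountGo (sub : List Int) (offset : Int) : Int :=
  if sub.length ≤ 1 then offset
  else
    if PySem.List.pyGetD sub (((sub.length - 1) / 2 : Nat) : Int) 0 > PySem.List.pyGetD sub (-1) 0 then
      findRotationCountGo (sub.drop ((sub.length - 1) / 2 + 1)) (offset + (((sub.length - 1) / 2 : Nat) : Int) + 1)
    else
      findRotationCountGo (sub.take ((sub.length - 1) / 2 + 1)) offset
termination_by sub.length
decreasing_by
  · simp; omega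
  · simp; omega

def findRotationCount_alt (nums : List Int) : Int :=
  findRotationCountGo nums 0

-- ===== PRECONDITION & SPEC =====
def Spec_findRotationCount (nums : List Int) (out : Int) : Prop := out = findRotationCount_alt nums
instance (nums : List Int) (out : Int) : Decidable (Spec_findRotationCount nums out) := by unfold Spec_findRotationCount; infer_instance

-- ===== CLAIM (what is proved, stated in full; the proofs are below) =====
def Claim_equal_findRotationCount : Prop := ∀ (nums : List Int), Dom_findRotationCount nums → Spec_findRotationCount nums (findRotationCount nums)

-- ===== LEMMAS AND PROOFS =====

theorem loop_eq_go (k : Nat) : ∀ (nums : List Int) (left right : Int),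
    (right - left).toNat ≤ k → 0 ≤ left → right < nums.length →
    findRotationCountLoop nums left right
      = findRotationCountGo ((nums.drop left.toNat).take (right - left + 1).toNat) left := by
  induction k with
  | zero =>
    intro nums left right hk hl hr
    have hlr : ¬ left < right := by omega
    rw [findRotationCountLoop, dif_neg hlr, findRotationCountGo, if_pos]
    have : ((nums.drop left.toNat).take (right - left + 1).toNat).length
        = min (right - left + 1).toNat (nums.length - left.toNat) := by
      simp
    omega
  | succ k ih =>
    intro nums left right hk hl hr
    by_cases hlr : left < right
    · rw [findRotationCountLoop, dif_pos hlr]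
      set K : Nat := (right - left + 1).toNat with hK
      set L : Nat := left.toNat with hL
      set sub : List Int := (nums.drop L).take K with hsub
      have hsublen : sub.length = K := by
        simp [hsub]; omega
      have hK2 : 2 ≤ K := by omega
      set m : Nat := (K - 1) / 2 with hm
      have hmlen' : (K - 1) / 2 = m := hm.symm
      have hmid : PySem.Int.floordiv (left + right) 2 = left + (m : Int) := by
        rw [PySem.Int.floordiv_eq_ediv_of_pos (by omega)]
        omega
      have hmK : m < K - 1 ∨ m = K - 1 := by omega
      have hmK' : m + 1 ≤ K - 1 := by omega
      have hdm : sub.length - 1 = K - 1 := by omega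
      have hsubm : ∀ (i : Nat) (h : i < K),
          sub[i]'(by omega) = nums[L + i]'(by omega) := by
        intro i h
        simp [hsub]
      have hA1 : PySem.List.pyGetD nums (left + (m : Int)) 0 = sub[m]'(by omega) := by
        rw [PySem.List.pyGetD_eq_getElem nums 0 (by omega) (by omega)]
        rw [hsubm m (by omega)]
        exact getElem_congr_idx (by omega)
      have hA2 : PySem.List.pyGetD nums right 0 = sub[K - 1]'(by omega) := by
        rw [PySem.List.pyGetD_eq_getElem nums 0 (by omega) (by omega)]
        rw [hsubm (K - 1) (by omega)]
        exact getElem_congr_idx (by omega)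
      have hB1 : PySem.List.pyGetD sub (m : Int) 0 = sub[m]'(by omega) := by
        rw [PySem.List.pyGetD_eq_getElem sub 0 (by omega) (by rw [hsublen]; omega)]
        exact getElem_congr_idx (by omega)
      have hne : sub ≠ [] := by intro h; rw [h] at hsublen; simp at hsublen; omega
      have hB2 : PySem.List.pyGetD sub (-1) 0 = sub[K - 1]'(by omega) := by
        rw [PySem.List.pyGetD_neg_one sub 0 hne, List.getLast_eq_getElem]
        exact getElem_congr_idx (by omega)
      conv_rhs => rw [findRotationCountGo, if_neg (show ¬ sub.length ≤ 1 by omega), hdm, hmlen', hB1, hB2]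
      rw [hmid]
      simp only [hA1, hA2]
      by_cases hc : sub[m]'(by omega) > sub[K - 1]'(by omega)
      · rw [if_pos hc, if_pos hc]
        have := ih nums (left + (m : Int) + 1) right (by omega) (by omega) hr
        rw [this]
        congr 1
        · rw [hsub, List.drop_take, List.drop_drop]
          congr 2
          · omega
          · omega
      · rw [if_neg hc, if_neg hc]
        have := ih nums left (left + (m : Int)) (by omega) hl (by omega)
        rw [this]
        congr 1
        rw [hsub, List.take_take]
        congr 1
        omega
    · rw [findRotationCountLoop, dif_neg hlr, findRotationCountGo, if_pos]
      have : ((nums.drop left.toNat).take (right - left + 1).toNat).length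
          = min (right - left + 1).toNat (nums.length - left.toNat) := by
        simp
      omega

-- ===== VERDICT (by name: the statement is the Claim_ definition above) =====
theorem findRotationCount_spec : Claim_equal_findRotationCount := by
  intro nums _
  unfold Spec_findRotationCount findRotationCount findRotationCount_alt
  have h := loop_eq_go ((nums.length : Int) - 1 - 0).toNat nums 0 ((nums.length : Int) - 1)
    (le_refl _) (le_refl 0) (by omega)
  rw [h]
  have : (((nums.length : Int) - 1 - 0 + 1).toNat) = nums.length := by omega
  simp
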